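-- pv_equiv track=rewrite | github.com/gvchaudhary22/cosmos | app/services/query_orchestrator.py | _decompose_query
-- ===== SOURCE A (Python) =====
-- from typing import Any, Dict, List, Optional
--
-- def _decompose_query(query: str) -> List[str]:
--     """Decompose multi-part queries into sub-queries for separate retrieval.
--
--     "Show me order status AND billing details" → ["order status", "billing details"]
--     "cancel karo aur refund bhi" → ["cancel karo", "refund bhi"]
--
--     Single-part queries return [original_query].
--     """
--     q = query.lower()
--
--     # Split on conjunctions
--     conjunctions = [" and ", " aur ", " also ", " bhi ", " plus ", " along with ", " as well as "]
--     parts = [query]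
--     for conj in conjunctions:
--         new_parts = []
--         for part in parts:
--             if conj in part.lower():
--                 splits = part.lower().split(conj)
--                 # Reconstruct with original case approximately
--                 idx = 0
--                 for s in splits:
--                     s = s.strip()
--                     if s and len(s) > 3:  # Skip tiny fragments
--                         new_parts.append(s)
--             else:
--                 new_parts.append(part)
--         parts = new_parts
--
--     # Clean and filter
--     result = [p.strip() for p in parts if len(p.strip()) > 5]
--
--     # Max 3 sub-queries to prevent explosion
--     return result[:3] if result else [query]
-- ===== SOURCE B (Python) =====
-- from typing import List
--
-- _CONJUNCTIONS = [" and ", " aur ", " also ", " bhi ", " plus ", " along with ", " as well as "]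
--
--
-- def _decompose_query(query: str) -> List[str]:
--     """Depth-first recursive decomposition: each fragment is expanded through the
--     remaining conjunctions before the next fragment is touched (A rebuilds the whole
--     parts list once per conjunction)."""
--
--     def expand(part: str, i: int) -> List[str]:
--         if i == len(_CONJUNCTIONS):
--             return [part]
--         conj = _CONJUNCTIONS[i]
--         low = part.lower()
--         if conj in low:
--             out: List[str] = []
--             for s in low.split(conj):
--                 s = s.strip()
--                 if len(s) > 3:  # len > 3 already implies non-empty
--                     out.extend(expand(s, i + 1))
--             return out
--         return expand(part, i + 1)
--
--     result = [p.strip() for p in expand(query, 0) if len(p.strip()) > 5]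
--     return result[:3] if result else [query]
-- ===== Notes on version B (the rewrite author's own statement) =====
-- stated objective: alternative
-- what changed: A runs one pass per conjunction, rebuilding the whole parts list seven times (breadth-first); B expands each fragment depth-first by a single recursion over the conjunction list, so the parts list is never rebuilt and the traversal order is different (proved order-independent).
import Mathlib
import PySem

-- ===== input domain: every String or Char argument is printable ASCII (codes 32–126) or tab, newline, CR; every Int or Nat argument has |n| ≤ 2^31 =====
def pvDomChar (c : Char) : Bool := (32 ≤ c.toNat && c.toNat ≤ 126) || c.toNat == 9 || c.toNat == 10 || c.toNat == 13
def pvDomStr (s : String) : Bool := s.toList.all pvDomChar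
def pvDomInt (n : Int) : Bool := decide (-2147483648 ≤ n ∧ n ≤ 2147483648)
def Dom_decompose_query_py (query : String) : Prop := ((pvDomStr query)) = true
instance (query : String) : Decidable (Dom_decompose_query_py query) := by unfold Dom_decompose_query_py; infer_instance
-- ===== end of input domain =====

-- B replaces A's seven breadth-first passes (one per conjunction, each rebuilding the
-- whole parts list) by a single depth-first recursion over the conjunction list applied
-- to each fragment; same results, proved order-independent ("alternative", not faster).

-- ===== PORT A =====
-- conjunctions list of A (module-level literal inside the function)
def pvConjA : List String :=
  [" and ", " aur ", " also ", " bhi ", " plus ", " along with ", " as well as "]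

-- part.lower().split(conj): conj is a nonempty literal, so Str.split? is always `some`;
-- the `.getD []` default is never taken.
def decompose_query_py (query : String) : List String :=
  let _q := PySem.Str.lower query  -- q = query.lower()  (assigned but never used by A)
  let parts := pvConjA.foldl (fun parts conj =>
    parts.foldl (fun new_parts part =>
      if PySem.Str.isIn conj (PySem.Str.lower part) then
        ((PySem.Str.split? (PySem.Str.lower part) conj).getD []).foldl (fun np s =>
          let s := PySem.Str.strip s
          if s ≠ "" ∧ 3 < PySem.Str.len s then np ++ [s] else np) new_parts
      else new_parts ++ [part]) []) [query]
  let result := parts.filterMap (fun p =>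
    if 5 < PySem.Str.len (PySem.Str.strip p) then some (PySem.Str.strip p) else none)
  if result ≠ [] then result.take 3 else [query]

-- ===== PORT B =====
def pvConjB : List String :=
  [" and ", " aur ", " also ", " bhi ", " plus ", " along with ", " as well as "]

-- expand(part, i): structural recursion on the remaining conjunction list
def pvExpand : List String → String → List String
  | [], part => [part]
  | conj :: rest, part =>
    let low := PySem.Str.lower part
    if PySem.Str.isIn conj low then
      ((PySem.Str.split? low conj).getD []).foldl (fun out s =>
        let s := PySem.Str.strip s
        if 3 < PySem.Str.len s then out ++ pvExpand rest s else out) []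
    else pvExpand rest part

def decompose_query_py_alt (query : String) : List String :=
  let result := (pvExpand pvConjB query).filterMap (fun p =>
    if 5 < PySem.Str.len (PySem.Str.strip p) then some (PySem.Str.strip p) else none)
  if result ≠ [] then result.take 3 else [query]

-- ===== PRECONDITION & SPEC =====
def Spec_decompose_query_py (query : String) (out : List String) : Prop := out = decompose_query_py_alt query
instance (query : String) (out : List String) : Decidable (Spec_decompose_query_py query out) := by unfold Spec_decompose_query_py; infer_instance

-- ===== CLAIM (what is proved, stated in full; the proofs are below) =====
def Claim_equal_decompose_query_py : Prop := ∀ (query : String), Dom_decompose_query_py query → Spec_decompose_query_py query (decompose_query_py query)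

-- ===== LEMMAS AND PROOFS =====

-- len(s) > 3 already forces s ≠ "", so A's two-part guard equals B's single guard
lemma pv_len_gt_ne_empty (s : String) (h : 3 < PySem.Str.len s) : s ≠ "" := by
  intro he; subst he; simp [PySem.Str.len] at h

-- what one part becomes under one pass of A's loop for conjunction `conj`
def pvStepOne (conj part : String) : List String :=
  if PySem.Str.isIn conj (PySem.Str.lower part) then
    ((PySem.Str.split? (PySem.Str.lower part) conj).getD []).flatMap (fun s =>
      if 3 < PySem.Str.len (PySem.Str.strip s) then [PySem.Str.strip s] else [])
  else [part]

-- A's inner fragment loop, with its accumulator generalized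
lemma pv_frag_fold (l : List String) (acc : List String) :
    l.foldl (fun np s =>
        let s := PySem.Str.strip s
        if s ≠ "" ∧ 3 < PySem.Str.len s then np ++ [s] else np) acc
      = acc ++ l.flatMap (fun s =>
          if 3 < PySem.Str.len (PySem.Str.strip s) then [PySem.Str.strip s] else []) := by
  induction l generalizing acc with
  | nil => simp
  | cons x t ih =>
    simp only [List.foldl_cons, List.flatMap_cons, ih]
    by_cases h : 3 < PySem.Str.len (PySem.Str.strip x)
    · rw [if_pos ⟨pv_len_gt_ne_empty _ h, h⟩, if_pos h]; simp
    · rw [if_neg (fun hc => h hc.2), if_neg h]; simp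

-- B's inner fragment loop, with its accumulator generalized
lemma pv_frag_fold_alt (rest : List String) (l : List String) (acc : List String) :
    l.foldl (fun out s =>
        let s := PySem.Str.strip s
        if 3 < PySem.Str.len s then out ++ pvExpand rest s else out) acc
      = acc ++ l.flatMap (fun s =>
          if 3 < PySem.Str.len (PySem.Str.strip s) then pvExpand rest (PySem.Str.strip s) else []) := by
  induction l generalizing acc with
  | nil => simp
  | cons x t ih =>
    simp only [List.foldl_cons, List.flatMap_cons, ih]
    by_cases h : 3 < PySem.Str.len (PySem.Str.strip x)
    · rw [if_pos h, if_pos h]; simp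
    · rw [if_neg h, if_neg h]; simp

-- the body of one step of A's pass, rewritten as append of pvStepOne
lemma pv_F_eq (conj part : String) (acc : List String) :
    (if PySem.Str.isIn conj (PySem.Str.lower part) then
        ((PySem.Str.split? (PySem.Str.lower part) conj).getD []).foldl (fun np s =>
          let s := PySem.Str.strip s
          if s ≠ "" ∧ 3 < PySem.Str.len s then np ++ [s] else np) acc
      else acc ++ [part]) = acc ++ pvStepOne conj part := by
  unfold pvStepOne
  split_ifs with h
  · exact pv_frag_fold _ acc
  · rfl

-- one pass of A's outer loop over the parts list = flatMap of pvStepOne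
lemma pv_pass_eq (conj : String) (parts acc : List String) :
    parts.foldl (fun new_parts part =>
      if PySem.Str.isIn conj (PySem.Str.lower part) then
        ((PySem.Str.split? (PySem.Str.lower part) conj).getD []).foldl (fun np s =>
          let s := PySem.Str.strip s
          if s ≠ "" ∧ 3 < PySem.Str.len s then np ++ [s] else np) new_parts
      else new_parts ++ [part]) acc
    = acc ++ parts.flatMap (pvStepOne conj) := by
  induction parts generalizing acc with
  | nil => simp
  | cons p t ih =>
    rw [List.foldl_cons, pv_F_eq, ih, List.flatMap_cons, List.append_assoc]

-- expanding one part depth-first through conj :: rest = one A-step then the rest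
lemma pv_expand_cons (conj : String) (rest : List String) (part : String) :
    pvExpand (conj :: rest) part = (pvStepOne conj part).flatMap (pvExpand rest) := by
  rw [pvExpand, pvStepOne]
  split_ifs with h
  · rw [pv_frag_fold_alt, List.nil_append, List.flatMap_assoc]
    apply List.flatMap_congr  -- pointwise: push pvExpand under the if
    intro s _
    split_ifs with hs
    · simp
    · simp
  · simp

-- A's whole conjunction loop, from any parts list = flatMap of B's depth-first expansion
lemma pv_chain (L : List String) (ps : List String) :
    L.foldl (fun parts conj =>
      parts.foldl (fun new_parts part =>
        if PySem.Str.isIn conj (PySem.Str.lower part) then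
          ((PySem.Str.split? (PySem.Str.lower part) conj).getD []).foldl (fun np s =>
            let s := PySem.Str.strip s
            if s ≠ "" ∧ 3 < PySem.Str.len s then np ++ [s] else np) new_parts
        else new_parts ++ [part]) []) ps
    = ps.flatMap (pvExpand L) := by
  induction L generalizing ps with
  | nil => simp [pvExpand]
  | cons c t ih =>
    rw [List.foldl_cons, pv_pass_eq, List.nil_append, ih, List.flatMap_assoc]
    apply List.flatMap_congr
    intro p _
    rw [pv_expand_cons]

-- ===== VERDICT (by name: the statement is the Claim_ definition above) =====
theorem decompose_query_py_spec : Claim_equal_decompose_query_py := by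
  intro query _
  show decompose_query_py query = decompose_query_py_alt query
  simp only [decompose_query_py, decompose_query_py_alt]
  rw [pv_chain]
  simp [pvConjA, pvConjB]
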